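-- pv_equiv track=rewrite | github.com/SiJiDo/MiScan | lib/utils/webscan/crawl/Smart_fill.py | smart_fill
-- ===== SOURCE A (Python) =====
-- form_name_kb = {
--     'admin' : ['username', 'user', 'userid', 'nickname', 'name'],
--     '123456' : ['password', 'pass', 'pwd'],
--     'test@test.com' : ['email', 'mail', 'usermail'],
--     '13990112341' : ['mobile'],
--     'Miscan' : ['conntent', 'text', 'query', 'search', 'data', 'comment'],
--     'Miscan.test.test.com' : ['domain'],
--     'http://Miscan.test.test.com' : ['link', 'url', 'website']
-- }
--
-- def smart_fill(variable_name):
--     variable_name = variable_name.lower()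
--     flag = False
--     for filled_value, variable_name_list in form_name_kb.items():
--         for variable_name_db in variable_name_list:
--             if(variable_name_db == variable_name):
--                 flag = True
--                 return filled_value
--     if(not flag):
--         msg = '[smart_fill] Falied to find a value for parameter with name "' + variable_name + '".'
--         #log.debug(msg)
--         return 'UNKNOWN'
-- ===== SOURCE B (Python) =====
-- # Flat, hand-inverted lookup table: each known form-field name maps directly
-- # to its canned fill value; smart_fill is one dict lookup with a default.
-- _reverse_kb = {
--     'username': 'admin', 'user': 'admin', 'userid': 'admin',
--     'nickname': 'admin', 'name': 'admin',
--     'password': '123456', 'pass': '123456', 'pwd': '123456',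
--     'email': 'test@test.com', 'mail': 'test@test.com', 'usermail': 'test@test.com',
--     'mobile': '13990112341',
--     'conntent': 'Miscan', 'text': 'Miscan', 'query': 'Miscan',
--     'search': 'Miscan', 'data': 'Miscan', 'comment': 'Miscan',
--     'domain': 'Miscan.test.test.com',
--     'link': 'http://Miscan.test.test.com', 'url': 'http://Miscan.test.test.com',
--     'website': 'http://Miscan.test.test.com',
-- }
--
-- def smart_fill(variable_name):
--     return _reverse_kb.get(variable_name.lower(), 'UNKNOWN')
-- ===== Notes on version B (the rewrite author's own statement) =====
-- stated objective: simpler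
-- what changed: Replaced the nested scan over value->names lists (with a dead flag variable) by a flat hand-inverted name->value dictionary, so smart_fill is a single lookup with a default.
import Mathlib
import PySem

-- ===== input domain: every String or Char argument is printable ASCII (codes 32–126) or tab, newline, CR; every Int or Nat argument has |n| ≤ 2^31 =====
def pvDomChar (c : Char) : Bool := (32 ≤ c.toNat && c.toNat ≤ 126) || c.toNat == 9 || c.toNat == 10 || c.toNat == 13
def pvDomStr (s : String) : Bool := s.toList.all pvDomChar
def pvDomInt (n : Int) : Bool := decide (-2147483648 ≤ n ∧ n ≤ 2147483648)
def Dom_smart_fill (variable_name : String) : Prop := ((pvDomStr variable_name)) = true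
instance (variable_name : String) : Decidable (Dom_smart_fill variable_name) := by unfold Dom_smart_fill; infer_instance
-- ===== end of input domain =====

-- B replaces A's nested scan over value->names lists by one flat hand-inverted
-- name->value dictionary and a single lookup with default ('simpler').

-- ===== PORT A =====
-- the module-level knowledge base, in its Python insertion order
def formNameKb : List (String × List String) :=
  [("admin", ["username", "user", "userid", "nickname", "name"]),
   ("123456", ["password", "pass", "pwd"]),
   ("test@test.com", ["email", "mail", "usermail"]),
   ("13990112341", ["mobile"]),
   ("Miscan", ["conntent", "text", "query", "search", "data", "comment"]),
   ("Miscan.test.test.com", ["domain"]),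
   ("http://Miscan.test.test.com", ["link", "url", "website"])]

-- inner for-loop of A: return filled_value on the first name equal to s
def smartFillInner (filledValue : String) (names : List String) (s : String) : Option String :=
  match names with
  | [] => none
  | n :: rest => if n == s then some filledValue else smartFillInner filledValue rest s

-- outer for-loop of A over form_name_kb.items()
def smartFillOuter (items : List (String × List String)) (s : String) : Option String :=
  match items with
  | [] => none
  | (fv, names) :: rest =>
    match smartFillInner fv names s with
    | some r => some r
    | none => smartFillOuter rest s

def smart_fill (variable_name : String) : String :=
  let s := PySem.Str.lower variable_name
  -- the 'flag' variable of A is only set just before an early return, so it is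
  -- equivalently: if the loops returned nothing, return 'UNKNOWN'
  match smartFillOuter formNameKb s with
  | some r => r
  | none => "UNKNOWN"

-- ===== PORT B =====
-- _reverse_kb, the flat hand-inverted dict literal of Source B
def reverseKb : PySem.Dict String String := PySem.Dict.ofList
  [("username", "admin"), ("user", "admin"), ("userid", "admin"),
   ("nickname", "admin"), ("name", "admin"),
   ("password", "123456"), ("pass", "123456"), ("pwd", "123456"),
   ("email", "test@test.com"), ("mail", "test@test.com"), ("usermail", "test@test.com"),
   ("mobile", "13990112341"),
   ("conntent", "Miscan"), ("text", "Miscan"), ("query", "Miscan"),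
   ("search", "Miscan"), ("data", "Miscan"), ("comment", "Miscan"),
   ("domain", "Miscan.test.test.com"),
   ("link", "http://Miscan.test.test.com"), ("url", "http://Miscan.test.test.com"),
   ("website", "http://Miscan.test.test.com")]

def smart_fill_alt (variable_name : String) : String :=
  PySem.Dict.getD reverseKb (PySem.Str.lower variable_name) "UNKNOWN"

-- ===== PRECONDITION & SPEC =====
def Spec_smart_fill (variable_name : String) (out : String) : Prop := out = smart_fill_alt variable_name
instance (variable_name : String) (out : String) : Decidable (Spec_smart_fill variable_name out) := by unfold Spec_smart_fill; infer_instance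

-- ===== CLAIM (what is proved, stated in full; the proofs are below) =====
def Claim_equal_smart_fill : Prop := ∀ (variable_name : String), Dom_smart_fill variable_name → Spec_smart_fill variable_name (smart_fill variable_name)

-- ===== LEMMAS AND PROOFS =====

-- first pair whose key equals s (the shape shared by A's scan and Dict.get? on a literal)
def lookupFirst (l : List (String × String)) (s : String) : Option String :=
  match l with
  | [] => none
  | (k, v) :: rest => if k == s then some v else lookupFirst rest s

theorem innerA_eq (fv : String) (names : List String) (s : String) :
    smartFillInner fv names s = lookupFirst (names.map (fun n => (n, fv))) s := by
  induction names with
  | nil => rfl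
  | cons n rest ih => simp only [smartFillInner, List.map, lookupFirst, ih]

theorem lookupFirst_append (l1 l2 : List (String × String)) (s : String) :
    lookupFirst (l1 ++ l2) s =
      (match lookupFirst l1 s with | some r => some r | none => lookupFirst l2 s) := by
  induction l1 with
  | nil => rfl
  | cons p rest ih =>
    obtain ⟨k, v⟩ := p
    simp only [List.cons_append, lookupFirst, ih]
    by_cases h : (k == s) = true <;> simp [h]

theorem outerA_eq (items : List (String × List String)) (s : String) :
    smartFillOuter items s =
      lookupFirst (items.flatMap (fun p => p.2.map (fun n => (n, p.1)))) s := by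
  induction items with
  | nil => rfl
  | cons p rest ih =>
    obtain ⟨fv, names⟩ := p
    simp only [smartFillOuter, List.flatMap_cons, lookupFirst_append, innerA_eq, ih]

theorem get?_eq_lookupFirst (l : List (String × String)) (s : String) :
    (PySem.Dict.mk l).get? s = lookupFirst l s := by
  induction l with
  | nil => simp [PySem.Dict.get?, lookupFirst]
  | cons p rest ih =>
    obtain ⟨k, v⟩ := p
    rw [PySem.Dict.get?_mk_cons, lookupFirst, ih]

-- B's literal flat table is exactly the flattening of A's knowledge base
theorem reverseKb_eq : reverseKb = PySem.Dict.mk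
    (formNameKb.flatMap (fun p => p.2.map (fun n => (n, p.1)))) := by
  decide

theorem smart_fill_agree (s : String) :
    (match smartFillOuter formNameKb s with
     | some r => r
     | none => "UNKNOWN") = PySem.Dict.getD reverseKb s "UNKNOWN" := by
  rw [reverseKb_eq, PySem.Dict.getD, get?_eq_lookupFirst, outerA_eq]
  cases lookupFirst (formNameKb.flatMap (fun p => p.2.map (fun n => (n, p.1)))) s <;> rfl

-- ===== VERDICT (by name: the statement is the Claim_ definition above) =====
theorem smart_fill_spec : Claim_equal_smart_fill := by
  intro v _
  unfold Spec_smart_fill smart_fill smart_fill_alt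
  exact smart_fill_agree (PySem.Str.lower v)
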